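-- pv_equiv track=rewrite | github.com/SkyX-ID-FR/Batch-Crypter | algo_crypt.py | crypter_mc
-- ===== SOURCE A (Python) =====
-- def crypter_mc(s):
--     alpha = 'ABCDEFGHIJKLMNOPQRSTUVWXYZ'
--     res = ''
--     for lettre in s:
--         occurence = s.count(lettre)
--         pos = 0
--         if occurence % 2 == 0:
--             pos = occurence//2
--         else:
--             pos = occurence*2
--         ordre = alpha.find(lettre)
--         indice = pos+ordre
--         if indice > 25:
--             indice = indice % 26
--         res += alpha[indice]
--     return res
-- ===== SOURCE B (Python) =====
-- def crypter_mc(s):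
--     positions = {}
--     for i, c in enumerate(s):
--         positions.setdefault(c, []).append(i)
--     out = [None] * len(s)
--     for c, idxs in positions.items():
--         n = len(idxs)
--         pos = n // 2 if n % 2 == 0 else n * 2
--         ordre = ord(c) - 65 if 'A' <= c <= 'Z' else -1
--         ch = chr(65 + (pos + ordre) % 26)
--         for i in idxs:
--             out[i] = ch
--     return ''.join(out)
-- ===== Notes on version B (the rewrite author's own statement) =====
-- stated objective: faster
-- what changed: B inverts the traversal: it builds an index-of-positions map (char -> list of positions) in one pass, then for each DISTINCT character computes its output letter once by pure ordinal arithmetic (ord/chr with a single %26, no alphabet string, no find, no per-occurrence rescans) and scatters it into a preallocated output buffer at all its positions; A instead walks the string appending one char at a time, rescanning the whole string with s.count and scanning the alphabet with find for every occurrence.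
import Mathlib
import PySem

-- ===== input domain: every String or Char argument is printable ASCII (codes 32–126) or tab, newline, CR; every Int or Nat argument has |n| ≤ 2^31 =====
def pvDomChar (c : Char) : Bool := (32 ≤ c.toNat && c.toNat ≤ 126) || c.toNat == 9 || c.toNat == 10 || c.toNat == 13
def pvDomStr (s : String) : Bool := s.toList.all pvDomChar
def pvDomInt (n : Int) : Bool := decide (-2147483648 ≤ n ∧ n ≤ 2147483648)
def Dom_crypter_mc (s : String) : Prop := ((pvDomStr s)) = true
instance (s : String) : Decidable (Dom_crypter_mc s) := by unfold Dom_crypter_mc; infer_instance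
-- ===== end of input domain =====

-- B inverts the traversal: it groups the positions of each distinct character once, computes
-- each distinct character's output letter by ordinal arithmetic (one % 26, no alphabet string),
-- and scatters it into a preallocated buffer (objective: faster).

-- ===== PORT A =====
-- A-side helper: the body of A's loop, one character at a time; `occurence` rescans the whole
-- string. `alpha[indice]` never raises in Python here (0 ≤ indice ≤ 25 always), so the
-- `.getD 'A'` default of the total `pyGet?` is unreachable.
def cryptChar (s : List Char) (lettre : Char) : Char :=
  let alpha : List Char := "ABCDEFGHIJKLMNOPQRSTUVWXYZ".toList
  let occurence : Int := (PySem.Chars.count s [lettre] : Int)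
  let pos : Int := if PySem.Int.mod occurence 2 = 0 then PySem.Int.floordiv occurence 2
                   else occurence * 2
  let ordre : Int := PySem.Chars.find alpha [lettre]
  let indice : Int := pos + ordre
  let indice : Int := if indice > 25 then PySem.Int.mod indice 26 else indice
  (PySem.List.pyGet? alpha indice).getD 'A'

def crypter_mc (s : String) : String :=
  String.mk (s.toList.foldl (fun res lettre => res ++ [cryptChar s.toList lettre]) [])

-- ===== PORT B =====
-- B-side helper: the output letter of one distinct character from its occurrence count,
-- computed arithmetically (ord(c) - 65 for 'A' ≤ c ≤ 'Z', else -1, as in Source B).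
def altChar (c : Char) (n : Int) : Char :=
  let pos : Int := if PySem.Int.mod n 2 = 0 then PySem.Int.floordiv n 2 else n * 2
  let ordre : Int := if 'A' ≤ c ∧ c ≤ 'Z' then (c.toNat : Int) - 65 else -1
  Char.ofNat (65 + PySem.Int.mod (pos + ordre) 26).toNat

-- `positions.setdefault(c, []).append(i)` is `modify c [] (· ++ [i])`; `out[i] = ch` is the
-- total `pySetD` (every stored index is in range, so Python's assignment never raises); the
-- final join's `.getD 'A'` is unreachable (every slot was set: each index belongs to a group).
def crypter_mc_alt (s : String) : String :=
  let l := s.toList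
  let positions : PySem.Dict Char (List Int) :=
    (PySem.List.enumerate l).foldl (fun d p => d.modify p.2 [] (· ++ [p.1])) PySem.Dict.empty
  let out0 : List (Option Char) := List.replicate l.length none
  let out := positions.items.foldl
    (fun o g => g.2.foldl
      (fun o i => PySem.List.pySetD o i (some (altChar g.1 (g.2.length : Int)))) o) out0
  String.mk (out.map (fun oc => oc.getD 'A'))

-- ===== PRECONDITION & SPEC =====
def Spec_crypter_mc (s : String) (out : String) : Prop := out = crypter_mc_alt s
instance (s : String) (out : String) : Decidable (Spec_crypter_mc s out) := by unfold Spec_crypter_mc; infer_instance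

-- ===== CLAIM (what is proved, stated in full; the proofs are below) =====
def Claim_equal_crypter_mc : Prop := ∀ (s : String), Dom_crypter_mc s → Spec_crypter_mc s (crypter_mc s)

-- ===== LEMMAS AND PROOFS =====
set_option maxRecDepth 10000

-- the positions of character c in l, as B's grouping pass stores them
def idxsOf (l : List Char) (c : Char) : List Int :=
  ((PySem.List.enumerate l).filter (fun p => p.2 == c)).map (·.1)

-- Python's s.count(sub) for a single-character sub is the character count.
lemma chars_count_singleton (l : List Char) (c : Char) :
    PySem.Chars.count l [c] = l.count c := by
  have go : ∀ (fuel : Nat) (t : List Char) (acc : Nat), t.length ≤ fuel →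
      PySem.Chars.count.go [c] fuel t acc = acc + t.count c := by
    intro fuel
    induction fuel with
    | zero =>
      intro t acc h
      have ht : t = [] := by cases t <;> simp_all
      subst ht
      simp [PySem.Chars.count.go.eq_1]
    | succ n ih =>
      intro t acc h
      cases t with
      | nil => rw [PySem.Chars.count.go.eq_2 _ _ _ (by omega)]; simp
      | cons hd tl =>
        rw [PySem.Chars.count.go.eq_3]
        have hlen : tl.length ≤ n := by simpa using h
        by_cases hc : c = hd
        · subst hc
          simp only [List.isPrefixOf, BEq.rfl, Bool.and_true,
            List.length_cons, List.length_nil, List.drop_succ_cons, List.drop_zero, if_true]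
          rw [ih tl (acc + 1) hlen]
          simp only [List.count_cons, BEq.rfl, if_true]
          omega
        · have hb : (c == hd) = false := by simp [hc]
          simp only [List.isPrefixOf, hb, Bool.false_and, if_false, Bool.false_eq_true]
          rw [ih tl acc hlen]
          simp only [List.count_cons, beq_iff_eq]
          rw [if_neg (fun e => hc e.symm)]
          omega
  unfold PySem.Chars.count
  simp only [List.isEmpty_cons, if_false, Bool.false_eq_true]
  rw [go l.length l 0 (le_refl _)]
  simp

lemma crypter_mc_eq_map (s : String) :
    crypter_mc s = String.mk (s.toList.map (fun c => cryptChar s.toList c)) := by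
  unfold crypter_mc
  rw [PySem.List.foldl_append_singleton_eq_map]
  rfl

lemma countP_enumerate (l : List Char) (c : Char) : ∀ s : Int,
    (PySem.List.enumerate l s).countP (fun p => p.2 == c) = l.count c := by
  induction l with
  | nil => intro s; simp [PySem.List.enumerate_nil]
  | cons h t ih =>
    intro s
    rw [PySem.List.enumerate_cons]
    rw [List.countP_cons, List.count_cons, ih]

lemma length_idxsOf (l : List Char) (c : Char) : (idxsOf l c).length = l.count c := by
  unfold idxsOf
  rw [List.length_map, ← List.countP_eq_length_filter]
  exact countP_enumerate l c 0

lemma mem_idxsOf (l : List Char) (c : Char) (j : Nat) (hj : j < l.length) :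
    ((j : Int) ∈ idxsOf l c ↔ l[j] = c) := by
  unfold idxsOf
  simp only [List.mem_map, List.mem_filter, PySem.List.mem_enumerate_iff, beq_iff_eq]
  constructor
  · rintro ⟨p, ⟨⟨k, hk, rfl⟩, h2⟩, h1⟩
    simp only [zero_add] at h1 h2 ⊢
    have : k = j := by exact_mod_cast h1
    subst this; exact h2
  · intro h
    exact ⟨((j : Int), l[j]), ⟨⟨j, hj, by simp⟩, h⟩, rfl⟩

lemma nonneg_idxsOf (l : List Char) (c : Char) : ∀ i ∈ idxsOf l c, 0 ≤ i := by
  intro i hi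
  unfold idxsOf at hi
  simp only [List.mem_map, List.mem_filter, PySem.List.mem_enumerate_iff] at hi
  obtain ⟨p, ⟨⟨k, hk, rfl⟩, _⟩, rfl⟩ := hi
  simp

-- the inner scatter loop: length is preserved and every listed (nonnegative) slot gets v.
lemma setAll_length (is : List Int) (o : List (Option Char)) (v : Option Char) :
    (is.foldl (fun o i => PySem.List.pySetD o i v) o).length = o.length := by
  induction is generalizing o with
  | nil => rfl
  | cons i t ih => simp [List.foldl_cons, ih, PySem.List.length_pySetD]

lemma setAll_get? (is : List Int) (o : List (Option Char)) (v : Option Char) (j : Nat)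
    (hnn : ∀ i ∈ is, 0 ≤ i) :
    (is.foldl (fun o i => PySem.List.pySetD o i v) o)[j]?
      = if (j : Int) ∈ is ∧ j < o.length then some v else o[j]? := by
  induction is generalizing o with
  | nil => simp
  | cons i t ih =>
    have hi : 0 ≤ i := hnn i (by simp)
    rw [List.foldl_cons, ih _ (fun x hx => hnn x (by simp [hx])),
        PySem.List.pySetD_of_nonneg o v hi]
    simp only [List.length_set, List.getElem?_set, List.mem_cons]
    by_cases hmem : (j : Int) ∈ t
    · by_cases hlt : j < o.length
      · simp [hmem, hlt]
      · simp [hmem, hlt]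
        omega
    · by_cases heq : i.toNat = j
      · have : (j : Int) = i := by omega
        by_cases hlt : j < o.length
        · simp [hmem, heq, hlt, this]
        · simp [heq, hlt, this]
      · have : ¬ ((j : Int) = i) := by omega
        simp [hmem, heq, this]

-- the grouping pass: its keys are the distinct characters, its value at c is idxsOf l c.
lemma keys_positions (l : List Char) :
    ((PySem.List.enumerate l).foldl (fun d p => d.modify p.2 [] (· ++ [p.1]))
      PySem.Dict.empty).keys = PySem.Set.ofList l := by
  rw [PySem.Dict.keys_foldl_modify_key (PySem.List.enumerate l) (fun p => p.2) []
        (fun d p => (· ++ [p.1])) PySem.Dict.empty]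
  rw [PySem.List.map_snd_enumerate]
  rw [PySem.Dict.keys_empty]
  rfl

lemma getD_positions (l : List Char) (c : Char) :
    ((PySem.List.enumerate l).foldl (fun d p => d.modify p.2 [] (· ++ [p.1]))
      PySem.Dict.empty).getD c [] = idxsOf l c := by
  have h := PySem.Dict.getD_foldl_modify_append ((PySem.List.enumerate l).map Prod.swap)
      (PySem.Dict.empty (κ := Char) (ν := List Int)) c
  rw [List.foldl_map] at h
  simp only [Prod.swap] at h
  rw [h, PySem.Dict.getD_empty]
  unfold idxsOf
  simp [List.filter_map, List.map_map, Function.comp_def, Prod.swap]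

lemma items_positions (l : List Char) :
    ((PySem.List.enumerate l).foldl (fun d p => d.modify p.2 [] (· ++ [p.1]))
      PySem.Dict.empty).items = (PySem.Set.ofList l).map (fun c => (c, idxsOf l c)) := by
  have hnd : ((PySem.List.enumerate l).foldl (fun d p => d.modify p.2 [] (· ++ [p.1]))
      PySem.Dict.empty).keys.Nodup :=
    PySem.Dict.nodup_keys_foldl_modify_key (PySem.List.enumerate l) (fun p => p.2) []
      (fun d p => (· ++ [p.1])) PySem.Dict.empty (by simp [PySem.Dict.keys_empty])
  rw [PySem.Dict.items_eq_map_keys _ hnd [], keys_positions]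
  exact List.map_congr_left (fun c _ => by rw [getD_positions])

-- the outer scatter loop over the distinct characters.
lemma outer_length (gs : List (Char × List Int)) (o : List (Option Char)) :
    (gs.foldl (fun o g => g.2.foldl
      (fun o i => PySem.List.pySetD o i (some (altChar g.1 (g.2.length : Int)))) o) o).length
      = o.length := by
  induction gs generalizing o with
  | nil => rfl
  | cons g t ih => rw [List.foldl_cons, ih, setAll_length]

lemma outer_get? (l : List Char) (cs : List Char) (o : List (Option Char))
    (ho : o.length = l.length) (j : Nat) (hj : j < l.length) :
    ((cs.map (fun c => (c, idxsOf l c))).foldl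
        (fun o g => g.2.foldl
          (fun o i => PySem.List.pySetD o i (some (altChar g.1 (g.2.length : Int)))) o) o)[j]?
      = if l[j] ∈ cs then some (some (altChar l[j] ((l.count l[j] : Int)))) else o[j]? := by
  induction cs generalizing o with
  | nil => simp
  | cons c t ih =>
    rw [List.map_cons, List.foldl_cons]
    set o' := (idxsOf l c).foldl
      (fun o i => PySem.List.pySetD o i (some (altChar c ((idxsOf l c).length : Int)))) o with ho'
    have hlen : o'.length = l.length := by rw [ho', setAll_length, ho]
    rw [ih o' hlen]
    have hget : o'[j]? = if l[j] = c then some (some (altChar l[j] ((l.count l[j] : Int)))) else o[j]? := by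
      rw [ho', setAll_get? _ _ _ _ (nonneg_idxsOf l c), length_idxsOf]
      by_cases hc : l[j] = c
      · simp [mem_idxsOf l c j hj, hc, ho, hj]
      · simp [mem_idxsOf l c j hj, hc]
    by_cases h1 : l[j] ∈ t
    · simp [h1]
    · by_cases h2 : l[j] = c
      · simp [h2, hget]
      · simp [h1, h2, hget]

lemma crypter_mc_alt_eq_map (s : String) :
    crypter_mc_alt s = String.mk (s.toList.map (fun c => altChar c ((s.toList.count c : Int)))) := by
  unfold crypter_mc_alt
  set l := s.toList with hl
  refine congrArg String.mk ?_
  rw [items_positions]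
  apply List.ext_getElem?
  intro j
  rw [List.getElem?_map, List.getElem?_map]
  by_cases hj : j < l.length
  · rw [outer_get? l _ _ (by simp) j hj]
    rw [if_pos ((PySem.Set.mem_ofList l l[j]).mpr (l.getElem_mem hj))]
    simp [hj]
  · have ha : (((PySem.Set.ofList l).map (fun c => (c, idxsOf l c))).foldl
        (fun o g => g.2.foldl
          (fun o i => PySem.List.pySetD o i (some (altChar g.1 (g.2.length : Int)))) o)
        (List.replicate l.length none))[j]? = none := by
      rw [List.getElem?_eq_none_iff, outer_length]
      simp only [List.length_replicate]
      omega
    have hb : l[j]? = none := by rw [List.getElem?_eq_none_iff]; omega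
    rw [ha, hb]
    rfl

-- alpha.find on any ASCII character is the arithmetic ordinal (or -1).
lemma find_alpha : ∀ k : Nat, k < 127 →
    PySem.Chars.find ("ABCDEFGHIJKLMNOPQRSTUVWXYZ".toList) [Char.ofNat k]
      = (if 'A' ≤ Char.ofNat k ∧ Char.ofNat k ≤ 'Z' then ((Char.ofNat k).toNat : Int) - 65 else -1) := by
  decide

-- alpha[k] for 0 ≤ k < 26 is chr(65 + k).
lemma alpha_get : ∀ k : Nat, k < 26 →
    (PySem.List.pyGet? ("ABCDEFGHIJKLMNOPQRSTUVWXYZ".toList) (k : Int)).getD 'A'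
      = Char.ofNat (65 + k) := by
  decide

-- A's per-occurrence character equals B's arithmetic table entry.
lemma cryptChar_eq_altChar (l : List Char) (c : Char) (hc : c ∈ l)
    (hdom : pvDomChar c = true) : cryptChar l c = altChar c ((l.count c : Int)) := by
  have hcnt : 0 < l.count c := List.count_pos_iff.mpr hc
  have hk : c.toNat < 127 := by
    unfold pvDomChar at hdom
    simp only [Bool.or_eq_true, Bool.and_eq_true, decide_eq_true_eq, beq_iff_eq] at hdom
    omega
  have hfind : PySem.Chars.find ("ABCDEFGHIJKLMNOPQRSTUVWXYZ".toList) [c]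
      = (if 'A' ≤ c ∧ c ≤ 'Z' then (c.toNat : Int) - 65 else -1) := by
    have := find_alpha c.toNat hk
    rwa [Char.ofNat_toNat] at this
  simp only [cryptChar, altChar]
  rw [chars_count_singleton, hfind]
  simp only [PySem.Int.mod_eq_emod_of_pos (show (0:Int) < 2 by norm_num),
    PySem.Int.mod_eq_emod_of_pos (show (0:Int) < 26 by norm_num),
    PySem.Int.floordiv_eq_ediv_of_pos (show (0:Int) < 2 by norm_num)]
  have h1 : (1 : Int) ≤ (l.count c : Int) := by exact_mod_cast hcnt
  set occ : Int := (l.count c : Int) with hocc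
  set ordre : Int := if 'A' ≤ c ∧ c ≤ 'Z' then (c.toNat : Int) - 65 else -1 with hord
  set pos : Int := if occ % 2 = 0 then occ / 2 else occ * 2 with hpos
  have hordb : -1 ≤ ordre ∧ ordre ≤ 25 := by
    rw [hord]
    split_ifs with h
    · obtain ⟨hA, hZ⟩ := h
      have h65 : 65 ≤ c.toNat := UInt32.le_iff_toNat_le.mp (Char.le_def.mp hA)
      have h90 : c.toNat ≤ 90 := UInt32.le_iff_toNat_le.mp (Char.le_def.mp hZ)
      omega
    · omega
  have hpos1 : 1 ≤ pos := by rw [hpos]; split_ifs with h2 <;> omega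
  have hnn : 0 ≤ pos + ordre := by omega
  have hwrap : (if pos + ordre > 25 then (pos + ordre) % 26 else pos + ordre) = (pos + ordre) % 26 := by
    split_ifs with h26
    · rfl
    · exact (Int.emod_eq_of_lt hnn (by omega)).symm
  rw [hwrap]
  set e : Int := (pos + ordre) % 26 with he
  have he0 : 0 ≤ e := Int.emod_nonneg _ (by norm_num)
  have he26 : e < 26 := Int.emod_lt_of_pos _ (by norm_num)
  have hecast : e = ((e.toNat : Nat) : Int) := (Int.toNat_of_nonneg he0).symm
  rw [hecast, alpha_get e.toNat (by omega)]
  have h2 : ((65 : Int) + ((e.toNat : Nat) : Int)).toNat = 65 + e.toNat := by omega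
  rw [h2]

-- ===== VERDICT (by name: the statement is the Claim_ definition above) =====
theorem crypter_mc_spec : Claim_equal_crypter_mc := by
  intro s hdom
  unfold Spec_crypter_mc
  rw [crypter_mc_eq_map, crypter_mc_alt_eq_map]
  refine congrArg String.mk (List.map_congr_left (fun c hc => ?_))
  have hd : pvDomChar c = true := by
    have := (by simpa [Dom_crypter_mc, pvDomStr, List.all_eq_true] using hdom : ∀ x ∈ s.toList, pvDomChar x = true)
    exact this c hc
  exact cryptChar_eq_altChar s.toList c hc hd
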